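-- pv_equiv track=rewrite | github.com/softkleenex/coding_training | 백준/Silver/27884. 가희와 서울 지하철 3호선/가희와 서울 지하철 3호선.py | check_m
-- ===== SOURCE A (Python) =====
-- def check_m(now):
--     maxans = 1
--     ans = 1
--     for i in range(0, len(now) - 1):
--         if now[i] != now[i + 1]:
--             ans += 1
--             maxans = ans if ans >= maxans else maxans
--         else:
--             ans = 1
--
--     return maxans
-- ===== SOURCE B (Python) =====
-- def check_m(now):
--     n = len(now)
--     breaks = [-1] + [i for i in range(n - 1) if now[i] == now[i + 1]] + [n - 1]
--     return max(1, max(b - a for a, b in zip(breaks, breaks[1:])))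
-- ===== Notes on version B (the rewrite author's own statement) =====
-- stated objective: alternative
-- what changed: Replaces A's single interleaved run-counter/maximum scan by a two-phase decomposition: first collect the break positions (indices where adjacent elements are equal) bracketed by sentinels -1 and len(now)-1, then take the maximum gap between consecutive break positions.
import Mathlib
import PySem

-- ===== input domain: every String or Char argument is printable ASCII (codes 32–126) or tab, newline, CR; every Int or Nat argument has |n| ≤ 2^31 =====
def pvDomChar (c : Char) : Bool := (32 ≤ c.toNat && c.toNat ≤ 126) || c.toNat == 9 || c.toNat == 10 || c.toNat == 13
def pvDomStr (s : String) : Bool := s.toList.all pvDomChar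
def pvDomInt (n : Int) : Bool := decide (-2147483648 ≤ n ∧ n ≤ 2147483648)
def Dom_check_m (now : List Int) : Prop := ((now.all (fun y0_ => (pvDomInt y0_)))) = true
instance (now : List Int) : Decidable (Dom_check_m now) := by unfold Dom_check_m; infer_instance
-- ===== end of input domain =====

-- B computes the answer in two phases (collect the 'break' positions where adjacent
-- elements are equal, then take the maximum gap between consecutive breaks) instead of
-- A's single interleaved run/maximum accumulator scan; same O(n) cost (objective: alternative).

-- ===== PORT A =====
def check_m (now : List Int) : Int :=
  -- maxans = 1; ans = 1; for i in range(0, len(now)-1): …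
  (((PySem.List.pyRange 0 (PySem.List.len now - 1) 1).foldl
    (fun (st : Int × Int) i =>
      if PySem.List.pyGetD now i 0 ≠ PySem.List.pyGetD now (i + 1) 0 then
        -- ans += 1; maxans = ans if ans >= maxans else maxans
        (if st.1 ≤ st.2 + 1 then st.2 + 1 else st.1, st.2 + 1)
      else
        (st.1, 1))
    (1, 1)) : Int × Int).1

-- ===== PORT B =====
def check_m_alt (now : List Int) : Int :=
  let n : Int := PySem.List.len now
  -- breaks = [-1] + [i for i in range(n-1) if now[i] == now[i+1]] + [n-1]
  let breaks : List Int :=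
    [-1] ++ ((PySem.List.pyRange 0 (n - 1) 1).filter
      (fun i => PySem.List.pyGetD now i 0 == PySem.List.pyGetD now (i + 1) 0)) ++ [n - 1]
  -- max(1, max(b - a for a, b in zip(breaks, breaks[1:])))
  let gaps : List Int :=
    (breaks.zip (PySem.List.slice breaks (some 1) none)).map (fun p => p.2 - p.1)
  max 1 ((PySem.List.max? gaps (fun y => y)).getD 0)

-- ===== PRECONDITION & SPEC =====
def Spec_check_m (now : List Int) (out : Int) : Prop := out = check_m_alt now
instance (now : List Int) (out : Int) : Decidable (Spec_check_m now out) := by unfold Spec_check_m; infer_instance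

-- ===== CLAIM (what is proved, stated in full; the proofs are below) =====
def Claim_equal_check_m : Prop := ∀ (now : List Int), Dom_check_m now → Spec_check_m now (check_m now)

-- ===== LEMMAS AND PROOFS =====

-- The boolean difference sequence: diffs now = [now[i] != now[i+1]].
def pvDiffs (now : List Int) : List Bool :=
  (now.zip now.tail).map (fun p => decide (p.1 ≠ p.2))

-- A's loop, rephrased as structural recursion over the difference sequence.
def pvScanA : List Bool → Int × Int → Int × Int
  | [], st => st
  | true :: bs, st => pvScanA bs (if st.1 ≤ st.2 + 1 then st.2 + 1 else st.1, st.2 + 1)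
  | false :: bs, st => pvScanA bs (st.1, 1)

theorem pvScanA_cons (b : Bool) (bs : List Bool) (st : Int × Int) :
    pvScanA (b :: bs) st
      = pvScanA bs (if b then (if st.1 ≤ st.2 + 1 then st.2 + 1 else st.1, st.2 + 1) else (st.1, 1)) := by
  cases b <;> simp [pvScanA]

-- The best (maximal) run value reachable from a current run of length a.
def pvBest : List Bool → Int → Int
  | [], a => a
  | true :: bs, a => pvBest bs (a + 1)
  | false :: bs, a => max a (pvBest bs 1)

-- Positions (from start s) of the 'false' entries of the difference sequence.
def pvFalsePos : Nat → List Bool → List Int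
  | _, [] => []
  | s, true :: bs => pvFalsePos (s + 1) bs
  | s, false :: bs => (s : Int) :: pvFalsePos (s + 1) bs

-- Maximum gap between consecutive break positions p :: is ++ [e].
def pvGmax : Int → List Int → Int → Int
  | p, [], e => e - p
  | p, i :: is, e => max (i - p) (pvGmax i is e)

-- The list of consecutive gaps of p :: is ++ [e].
def pvGapsList : Int → List Int → Int → List Int
  | p, [], e => [e - p]
  | p, i :: is, e => (i - p) :: pvGapsList i is e

theorem pvBest_ge (d : List Bool) (a : Int) : a ≤ pvBest d a := by
  induction d generalizing a with
  | nil => simp [pvBest]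
  | cons b bs ih =>
      cases b with
      | true => exact le_trans (by omega) (ih (a + 1))
      | false => simp [pvBest]

theorem pvScanA_best (d : List Bool) (m a : Int) (h1 : 1 ≤ a) (h2 : a ≤ m) :
    (pvScanA d (m, a)).1 = max m (pvBest d a) := by
  induction d generalizing m a with
  | nil => simp [pvScanA, pvBest]; omega
  | cons b bs ih =>
      cases b with
      | true =>
          have hmax : (if m ≤ a + 1 then a + 1 else m) = max m (a + 1) := (max_def m (a+1)).symm
          have hih := ih (max m (a + 1)) (a + 1) (by omega) (le_max_right _ _)
          have hb := pvBest_ge bs (a + 1)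
          simp only [pvScanA, pvBest]
          rw [show (if m ≤ a + 1 then a + 1 else m, a + 1) = (max m (a+1), a+1) by rw [hmax]]
          rw [hih]
          simp only [max_def] at *
          split_ifs at * <;> omega
      | false =>
          have hih := ih m 1 (le_refl 1) (by omega)
          have hb := pvBest_ge bs 1
          simp only [pvScanA, pvBest]
          rw [hih]
          simp only [max_def] at *
          split_ifs at * <;> omega

theorem pvGmax_fold (is : List Int) (p e acc : Int) :
    (pvGapsList p is e).foldl max acc = max acc (pvGmax p is e) := by
  induction is generalizing p acc with
  | nil => simp [pvGapsList, pvGmax]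
  | cons i is ih =>
      simp only [pvGapsList, pvGmax, List.foldl_cons]
      rw [ih, max_assoc]

theorem pvMax?_gapsList (p e : Int) (is : List Int) :
    PySem.List.max? (pvGapsList p is e) (fun y => y) = some (pvGmax p is e) := by
  cases is with
  | nil => simp [pvGapsList, pvGmax, PySem.List.max?_id_cons]
  | cons i is =>
      simp only [pvGapsList, pvGmax, PySem.List.max?_id_cons]
      rw [pvGmax_fold]

theorem pvZip_gaps (p e : Int) (is : List Int) :
    ((p :: (is ++ [e])).zip (is ++ [e])).map (fun q => q.2 - q.1) = pvGapsList p is e := by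
  induction is generalizing p with
  | nil => simp [pvGapsList]
  | cons i is ih => simpa [pvGapsList] using ih i

theorem pvGmax_falsePos (bs : List Bool) (s : Nat) (p : Int) :
    pvGmax p (pvFalsePos s bs) ((s : Int) + bs.length) = pvBest bs ((s : Int) - p) := by
  induction bs generalizing s p with
  | nil => simp [pvFalsePos, pvGmax, pvBest]
  | cons b bs ih =>
      cases b with
      | true =>
          have := ih (s + 1) p
          simp only [pvFalsePos, pvBest, List.length_cons] at *
          push_cast at *
          rw [show (s : Int) + ((bs.length : Int) + 1) = (s : Int) + 1 + bs.length by ring]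
          rw [this]
          congr 1
          ring
      | false =>
          have := ih (s + 1) ((s : Int))
          simp only [pvFalsePos, pvBest, pvGmax, List.length_cons] at *
          push_cast at *
          rw [show (s : Int) + ((bs.length : Int) + 1) = (s : Int) + 1 + bs.length by ring]
          rw [this]
          simp

-- getElem characterisation of the difference sequence.
theorem pvDiffs_get (now : List Int) (j : Nat) (h : j < (pvDiffs now).length) :
    (pvDiffs now)[j] =
      decide (PySem.List.pyGetD now (j : Int) 0 ≠ PySem.List.pyGetD now (((j + 1 : Nat)) : Int) 0) := by
  have hlen : (pvDiffs now).length = now.length - 1 := by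
    simp [pvDiffs, List.length_tail]
  have hj1 : j + 1 < now.length := by omega
  have hj : j < now.length := by omega
  have hjt : j < now.tail.length := by simp [List.length_tail]; omega
  simp only [pvDiffs, List.getElem_map, List.getElem_zip]
  have h1 : PySem.List.pyGetD now (j : Int) 0 = now[j] := by
    rw [PySem.List.pyGetD_natCast]; exact List.getD_eq_getElem _ _ hj
  have h2 : PySem.List.pyGetD now (((j + 1 : Nat)) : Int) 0 = now[j + 1] := by
    rw [PySem.List.pyGetD_natCast]; exact List.getD_eq_getElem _ _ hj1
  rw [h1, h2]
  congr 1
  · simp [List.getElem_tail]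

theorem pvBridgeA (now : List Int) (k j : Nat) (st : Int × Int)
    (hjk : j + k = (pvDiffs now).length) :
    (PySem.List.pyRange (j : Int) ((pvDiffs now).length : Int) 1).foldl
      (fun (st : Int × Int) i =>
        if PySem.List.pyGetD now i 0 ≠ PySem.List.pyGetD now (i + 1) 0 then
          (if st.1 ≤ st.2 + 1 then st.2 + 1 else st.1, st.2 + 1)
        else (st.1, 1)) st
      = pvScanA ((pvDiffs now).drop j) st := by
  induction k generalizing j st with
  | zero =>
      rw [PySem.List.pyRange_one_eq_nil (by omega)]
      rw [List.drop_of_length_le (by omega)]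
      rfl
  | succ k ih =>
      have hj : j < (pvDiffs now).length := by omega
      rw [PySem.List.pyRange_one_cons (by exact_mod_cast hj)]
      rw [List.foldl_cons]
      have hdrop : (pvDiffs now).drop j = (pvDiffs now)[j] :: (pvDiffs now).drop (j + 1) :=
        List.drop_eq_getElem_cons hj
      rw [hdrop]
      have hcond : (PySem.List.pyGetD now (j : Int) 0 ≠ PySem.List.pyGetD now (((j + 1 : Nat)) : Int) 0)
          ↔ ((pvDiffs now)[j] = true) := by
        rw [pvDiffs_get now j hj]; simp
      rw [show ((j : Int) + 1) = (((j + 1 : Nat)) : Int) by push_cast; ring]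
      rw [ih (j + 1) _ (by omega), pvScanA_cons]
      congr 1
      rw [if_congr hcond rfl rfl]

theorem pvBridgeF (now : List Int) (k j : Nat)
    (hjk : j + k = (pvDiffs now).length) :
    (PySem.List.pyRange (j : Int) ((pvDiffs now).length : Int) 1).filter
      (fun i => PySem.List.pyGetD now i 0 == PySem.List.pyGetD now (i + 1) 0)
      = pvFalsePos j ((pvDiffs now).drop j) := by
  induction k generalizing j with
  | zero =>
      rw [PySem.List.pyRange_one_eq_nil (by omega)]
      rw [List.drop_of_length_le (by omega)]
      rfl
  | succ k ih =>
      have hj : j < (pvDiffs now).length := by omega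
      rw [PySem.List.pyRange_one_cons (by exact_mod_cast hj)]
      rw [List.filter_cons]
      have hdrop : (pvDiffs now).drop j = (pvDiffs now)[j] :: (pvDiffs now).drop (j + 1) :=
        List.drop_eq_getElem_cons hj
      rw [hdrop]
      have hcond : (PySem.List.pyGetD now (j : Int) 0 == PySem.List.pyGetD now (((j + 1 : Nat)) : Int) 0)
          = !(pvDiffs now)[j] := by
        rw [pvDiffs_get now j hj]
        simp [beq_eq_decide]
      rw [show ((j : Int) + 1) = (((j + 1 : Nat)) : Int) by push_cast; ring]
      rw [ih (j + 1) (by omega), hcond]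
      cases hb : (pvDiffs now)[j] <;> simp [pvFalsePos]

theorem pvDiffs_length (now : List Int) (h : now ≠ []) :
    ((pvDiffs now).length : Int) = (PySem.List.len now) - 1 := by
  have : (pvDiffs now).length = now.length - 1 := by simp [pvDiffs, List.length_tail]
  rw [this, PySem.List.len_eq]
  cases now with
  | nil => exact absurd rfl h
  | cons x xs => simp

theorem check_m_eq_best (now : List Int) (h : now ≠ []) :
    check_m now = pvBest (pvDiffs now) 1 := by
  unfold check_m
  rw [← pvDiffs_length now h]
  have := pvBridgeA now (pvDiffs now).length 0 (1, 1) (by omega)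
  rw [show ((0 : Nat) : Int) = 0 by rfl] at this
  rw [this]
  simp only [List.drop_zero]
  rw [pvScanA_best _ 1 1 (le_refl 1) (le_refl 1)]
  have := pvBest_ge (pvDiffs now) 1
  omega

theorem check_m_alt_eq_best (now : List Int) (h : now ≠ []) :
    check_m_alt now = pvBest (pvDiffs now) 1 := by
  unfold check_m_alt
  simp only [PySem.List.slice_from_one]
  rw [← pvDiffs_length now h]
  have hf := pvBridgeF now (pvDiffs now).length 0 (by omega)
  rw [show ((0 : Nat) : Int) = 0 by rfl] at hf
  rw [hf]
  simp only [List.drop_zero]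
  have hcons : ([-1] ++ (pvFalsePos 0 (pvDiffs now) ++ [((pvDiffs now).length : Int)]))
      = (-1) :: (pvFalsePos 0 (pvDiffs now) ++ [((pvDiffs now).length : Int)]) := rfl
  rw [List.append_assoc, hcons, List.tail_cons]
  rw [pvZip_gaps, pvMax?_gapsList]
  have hg := pvGmax_falsePos (pvDiffs now) 0 (-1)
  norm_num at hg
  rw [hg]
  have := pvBest_ge (pvDiffs now) 1
  simp only [Option.getD_some]
  omega

-- ===== VERDICT (by name: the statement is the Claim_ definition above) =====
theorem check_m_spec : Claim_equal_check_m := by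
  intro now _
  unfold Spec_check_m
  cases hnow : now with
  | nil => decide
  | cons x xs =>
      rw [check_m_eq_best (x :: xs) (by simp), check_m_alt_eq_best (x :: xs) (by simp)]
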